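-- pv_equiv track=rewrite | github.com/glolivercoder/AILocal | backups_agente_especialista/agente_especialista_backup_20250621_100952/agentes_mcp/mcp_manager.py | analyze_prompt_for_mcps
-- ===== SOURCE A (Python) =====
-- from typing import Dict, List, Any, Optional, Tuple
--
-- def analyze_prompt_for_mcps(prompt: str) -> List[str]:
--     """Analisa o prompt e sugere MCPs necessários"""
--     prompt_lower = prompt.lower()
--     suggested_mcps = []
--
--     # Análise baseada em palavras-chave
--     if any(word in prompt_lower for word in ["web", "navegar", "site", "url", "browser"]):
--         suggested_mcps.append("browser-tools")
--
--     if any(word in prompt_lower for word in ["arquivo", "file", "ler", "escrever", "criar"]):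
--         suggested_mcps.append("filesystem")
--
--     if any(word in prompt_lower for word in ["git", "commit", "push", "repositório"]):
--         suggested_mcps.append("github")
--
--     if any(word in prompt_lower for word in ["banco", "database", "sql", "query"]):
--         suggested_mcps.append("postgres")
--
--     if any(word in prompt_lower for word in ["ollama", "modelo local", "cpu"]):
--         suggested_mcps.append("ollama")
--
--     if any(word in prompt_lower for word in ["buscar", "pesquisar", "google"]):
--         suggested_mcps.append("google-maps")
--
--     return suggested_mcps
-- ===== SOURCE B (Python) =====
-- # Text-driven scan: walk the lowered prompt once position by position, testing each
-- # keyword as a prefix of the current suffix (naive multi-pattern matching), collect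
-- # matched MCP tags in a set, and finally emit the tags in the fixed category order.
-- _PATTERNS = [
--     ("web", "browser-tools"), ("navegar", "browser-tools"), ("site", "browser-tools"),
--     ("url", "browser-tools"), ("browser", "browser-tools"),
--     ("arquivo", "filesystem"), ("file", "filesystem"), ("ler", "filesystem"),
--     ("escrever", "filesystem"), ("criar", "filesystem"),
--     ("git", "github"), ("commit", "github"), ("push", "github"), ("repositório", "github"),
--     ("banco", "postgres"), ("database", "postgres"), ("sql", "postgres"), ("query", "postgres"),
--     ("ollama", "ollama"), ("modelo local", "ollama"), ("cpu", "ollama"),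
--     ("buscar", "google-maps"), ("pesquisar", "google-maps"), ("google", "google-maps"),
-- ]
-- _ORDER = ["browser-tools", "filesystem", "github", "postgres", "ollama", "google-maps"]
--
-- def analyze_prompt_for_mcps(prompt):
--     s = prompt.lower()
--     found = set()
--     for i in range(len(s) + 1):
--         for kw, tag in _PATTERNS:
--             if s.startswith(kw, i):
--                 found.add(tag)
--     return [tag for tag in _ORDER if tag in found]
-- ===== Notes on version B (the rewrite author's own statement) =====
-- stated objective: alternative
-- what changed: Instead of A's keyword-driven pass (six any() blocks, each running a substring search over the prompt per keyword), B scans the lowered prompt text once position by position, testing every keyword as a prefix of the current suffix (naive multi-pattern matching), accumulates matched tags in a set, and finally emits the tags in the fixed category order.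
import Mathlib
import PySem

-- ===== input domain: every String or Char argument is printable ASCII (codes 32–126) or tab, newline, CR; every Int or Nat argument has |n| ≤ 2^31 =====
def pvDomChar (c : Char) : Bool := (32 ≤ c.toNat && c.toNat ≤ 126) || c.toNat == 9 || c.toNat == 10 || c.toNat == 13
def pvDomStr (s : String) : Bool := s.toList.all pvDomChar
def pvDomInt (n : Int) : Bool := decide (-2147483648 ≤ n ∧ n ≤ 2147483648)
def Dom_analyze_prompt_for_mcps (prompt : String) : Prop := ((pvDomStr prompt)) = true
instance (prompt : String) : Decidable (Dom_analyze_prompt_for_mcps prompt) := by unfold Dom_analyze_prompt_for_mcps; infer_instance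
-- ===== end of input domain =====

-- B replaces A's keyword-driven substring searches (six any() blocks) by a single
-- text-driven scan: walk the lowered prompt position by position testing each keyword
-- as a prefix of the current suffix, collect matched tags in a set, then emit them in
-- the fixed category order (objective: alternative algorithm, same cost).

-- ===== PORT A =====
-- literal transliteration of A: six sequential any()-guarded appends
def analyze_prompt_for_mcps (prompt : String) : List String :=
  let prompt_lower := PySem.Str.lower prompt
  let s0 : List String := []
  let s1 := if (["web", "navegar", "site", "url", "browser"].any
      (fun w => PySem.Str.isIn w prompt_lower)) then s0 ++ ["browser-tools"] else s0
  let s2 := if (["arquivo", "file", "ler", "escrever", "criar"].any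
      (fun w => PySem.Str.isIn w prompt_lower)) then s1 ++ ["filesystem"] else s1
  let s3 := if (["git", "commit", "push", "repositório"].any
      (fun w => PySem.Str.isIn w prompt_lower)) then s2 ++ ["github"] else s2
  let s4 := if (["banco", "database", "sql", "query"].any
      (fun w => PySem.Str.isIn w prompt_lower)) then s3 ++ ["postgres"] else s3
  let s5 := if (["ollama", "modelo local", "cpu"].any
      (fun w => PySem.Str.isIn w prompt_lower)) then s4 ++ ["ollama"] else s4
  let s6 := if (["buscar", "pesquisar", "google"].any
      (fun w => PySem.Str.isIn w prompt_lower)) then s5 ++ ["google-maps"] else s5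
  s6

-- ===== PORT B =====
-- Source B's flat (keyword, tag) pattern table, in the same order
def pvPatterns : List (String × String) :=
  [("web", "browser-tools"), ("navegar", "browser-tools"), ("site", "browser-tools"),
   ("url", "browser-tools"), ("browser", "browser-tools"),
   ("arquivo", "filesystem"), ("file", "filesystem"), ("ler", "filesystem"),
   ("escrever", "filesystem"), ("criar", "filesystem"),
   ("git", "github"), ("commit", "github"), ("push", "github"), ("repositório", "github"),
   ("banco", "postgres"), ("database", "postgres"), ("sql", "postgres"), ("query", "postgres"),
   ("ollama", "ollama"), ("modelo local", "ollama"), ("cpu", "ollama"),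
   ("buscar", "google-maps"), ("pesquisar", "google-maps"), ("google", "google-maps")]

-- Source B's fixed output order
def pvOrder : List String :=
  ["browser-tools", "filesystem", "github", "postgres", "ollama", "google-maps"]

-- the inner loop of Source B at one text position i: s.startswith(kw, i) → found.add(tag)
def pvScanStep (s : List Char) (found : PySem.Set String) (i : Nat) : PySem.Set String :=
  pvPatterns.foldl
    (fun acc p => if p.1.toList.isPrefixOf (s.drop i) then PySem.Set.add acc p.2 else acc)
    found

def analyze_prompt_for_mcps_alt (prompt : String) : List String :=
  let s := PySem.Chars.lower prompt.toList
  let found := (List.range (s.length + 1)).foldl (pvScanStep s) PySem.Set.empty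
  pvOrder.filter (fun tag => PySem.Set.contains found tag)

-- ===== PRECONDITION & SPEC =====
def Spec_analyze_prompt_for_mcps (prompt : String) (out : List String) : Prop := out = analyze_prompt_for_mcps_alt prompt
instance (prompt : String) (out : List String) : Decidable (Spec_analyze_prompt_for_mcps prompt out) := by unfold Spec_analyze_prompt_for_mcps; infer_instance

-- ===== CLAIM (what is proved, stated in full; the proofs are below) =====
def Claim_equal_analyze_prompt_for_mcps : Prop := ∀ (prompt : String), Dom_analyze_prompt_for_mcps prompt → Spec_analyze_prompt_for_mcps prompt (analyze_prompt_for_mcps prompt)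

-- ===== LEMMAS AND PROOFS =====

-- membership after one pvScanStep: a tag is present iff it was, or some pattern matches at i
theorem pvScanStep_mem (s : List Char) (found : PySem.Set String) (i : Nat) (tag : String) :
    tag ∈ pvScanStep s found i ↔
      tag ∈ found ∨ ∃ p ∈ pvPatterns, p.2 = tag ∧ p.1.toList <+: s.drop i := by
  unfold pvScanStep
  generalize pvPatterns = ps
  induction ps generalizing found with
  | nil => simp
  | cons p ps ih =>
    simp only [List.foldl_cons]
    rw [ih]
    by_cases h : p.1.toList <+: s.drop i
    · rw [if_pos (List.isPrefixOf_iff_prefix.2 h)]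
      constructor
      · rintro (h1 | ⟨q, hq, h2, h3⟩)
        · rcases (PySem.Set.mem_add found p.2 tag).1 h1 with h3 | h3
          · exact Or.inl h3
          · exact Or.inr ⟨p, List.mem_cons_self .., h3.symm, h⟩
        · exact Or.inr ⟨q, List.mem_cons_of_mem _ hq, h2, h3⟩
      · rintro (h1 | ⟨q, hq, h2, h3⟩)
        · exact Or.inl ((PySem.Set.mem_add found p.2 tag).2 (Or.inl h1))
        · rcases List.mem_cons.1 hq with rfl | hq'
          · exact Or.inl ((PySem.Set.mem_add found _ tag).2 (Or.inr h2.symm))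
          · exact Or.inr ⟨q, hq', h2, h3⟩
    · rw [if_neg (fun hc => h (List.isPrefixOf_iff_prefix.1 hc))]
      constructor
      · rintro (h1 | ⟨q, hq, h2, h3⟩)
        · exact Or.inl h1
        · exact Or.inr ⟨q, List.mem_cons_of_mem _ hq, h2, h3⟩
      · rintro (h1 | ⟨q, hq, h2, h3⟩)
        · exact Or.inl h1
        · rcases List.mem_cons.1 hq with rfl | hq'
          · exact absurd h3 h
          · exact Or.inr ⟨q, hq', h2, h3⟩

-- membership after the full text scan
theorem pvScan_mem (s : List Char) (n : Nat) (tag : String) :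
    tag ∈ (List.range n).foldl (pvScanStep s) PySem.Set.empty ↔
      ∃ i < n, ∃ p ∈ pvPatterns, p.2 = tag ∧ p.1.toList <+: s.drop i := by
  induction n with
  | zero => simp [PySem.Set.empty]
  | succ n ih =>
    rw [List.range_succ, List.foldl_append]
    simp only [List.foldl_cons, List.foldl_nil, pvScanStep_mem, ih]
    constructor
    · rintro (⟨i, hi, hp⟩ | ⟨p, hp, h2, h3⟩)
      · exact ⟨i, Nat.lt_succ_of_lt hi, hp⟩
      · exact ⟨n, Nat.lt_succ_self n, p, hp, h2, h3⟩
    · rintro ⟨i, hi, hp⟩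
      rcases Nat.lt_succ_iff_lt_or_eq.1 hi with h | h
      · exact Or.inl ⟨i, h, hp⟩
      · exact Or.inr (h ▸ hp)

-- for a nonempty keyword, a match at some position within the scan range = substring
theorem pvPrefix_drop_iff (kw s : List Char) (hkw : kw ≠ []) :
    (∃ i < s.length + 1, kw <+: s.drop i) ↔ PySem.Chars.isIn kw s = true := by
  rw [← PySem.Chars.exists_prefix_drop_iff_isIn]
  constructor
  · rintro ⟨i, _, h⟩; exact ⟨i, h⟩
  · rintro ⟨j, h⟩
    by_cases hj : j < s.length + 1
    · exact ⟨j, hj, h⟩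
    · exfalso
      rw [List.drop_eq_nil_of_le (by omega)] at h
      exact hkw (List.prefix_nil.1 h)

-- a tag is found by the scan iff one of its keywords occurs in the text
theorem pvFound_iff (s : List Char) (tag : String) (kws : List String)
    (hgrp : ∀ p ∈ pvPatterns, p.2 = tag ↔ p.1 ∈ kws)
    (hne : ∀ kw ∈ kws, kw.toList ≠ [])
    (hsub : ∀ kw ∈ kws, (kw, tag) ∈ pvPatterns) :
    PySem.Set.contains ((List.range (s.length + 1)).foldl (pvScanStep s) PySem.Set.empty) tag
      = kws.any (fun kw => PySem.Chars.isIn kw.toList s) := by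
  rw [Bool.eq_iff_iff]
  unfold PySem.Set.contains
  rw [List.contains_iff_mem, pvScan_mem, List.any_eq_true]
  constructor
  · rintro ⟨i, hi, p, hp, h2, h3⟩
    have hk : p.1 ∈ kws := (hgrp p hp).1 h2
    exact ⟨p.1, hk, (pvPrefix_drop_iff _ s (hne _ hk)).1 ⟨i, hi, h3⟩⟩
  · rintro ⟨kw, hkw, hin⟩
    obtain ⟨i, hi, hpre⟩ := (pvPrefix_drop_iff kw.toList s (hne _ hkw)).2 hin
    exact ⟨i, hi, (kw, tag), hsub _ hkw, rfl, hpre⟩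

-- Chars-level isIn on the lowered char list equals Str-level isIn on the lowered string
theorem pvIsIn_lower (kw prompt : String) :
    PySem.Chars.isIn kw.toList (PySem.Chars.lower prompt.toList)
      = PySem.Str.isIn kw (PySem.Str.lower prompt) := by
  rw [Bool.eq_iff_iff, PySem.Chars.isIn_iff_infix, PySem.Str.isIn_iff_infix,
    PySem.Str.toList_lower]

theorem analyze_prompt_for_mcps_eq (prompt : String) :
    analyze_prompt_for_mcps prompt = analyze_prompt_for_mcps_alt prompt := by
  have hf : ∀ (tag : String) (kws : List String),
      (∀ p ∈ pvPatterns, p.2 = tag ↔ p.1 ∈ kws) →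
      (∀ kw ∈ kws, kw.toList ≠ []) → (∀ kw ∈ kws, (kw, tag) ∈ pvPatterns) →
      PySem.Set.contains
        ((List.range ((PySem.Chars.lower prompt.toList).length + 1)).foldl
          (pvScanStep (PySem.Chars.lower prompt.toList)) PySem.Set.empty) tag
        = kws.any (fun kw => PySem.Str.isIn kw (PySem.Str.lower prompt)) := by
    intro tag kws h1 h2 h3
    rw [pvFound_iff _ tag kws h1 h2 h3]
    exact List.any_congr rfl (fun kw => pvIsIn_lower kw prompt)
  unfold analyze_prompt_for_mcps analyze_prompt_for_mcps_alt pvOrder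
  dsimp only
  simp only [List.filter_cons, List.filter_nil]
  rw [hf "browser-tools" ["web", "navegar", "site", "url", "browser"]
      (by decide) (by decide) (by decide),
    hf "filesystem" ["arquivo", "file", "ler", "escrever", "criar"]
      (by decide) (by decide) (by decide),
    hf "github" ["git", "commit", "push", "repositório"]
      (by decide) (by decide) (by decide),
    hf "postgres" ["banco", "database", "sql", "query"]
      (by decide) (by decide) (by decide),
    hf "ollama" ["ollama", "modelo local", "cpu"]
      (by decide) (by decide) (by decide),
    hf "google-maps" ["buscar", "pesquisar", "google"]
      (by decide) (by decide) (by decide)]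
  generalize (["web", "navegar", "site", "url", "browser"].any
      (fun k => PySem.Str.isIn k (PySem.Str.lower prompt))) = c1
  generalize (["arquivo", "file", "ler", "escrever", "criar"].any
      (fun k => PySem.Str.isIn k (PySem.Str.lower prompt))) = c2
  generalize (["git", "commit", "push", "repositório"].any
      (fun k => PySem.Str.isIn k (PySem.Str.lower prompt))) = c3
  generalize (["banco", "database", "sql", "query"].any
      (fun k => PySem.Str.isIn k (PySem.Str.lower prompt))) = c4
  generalize (["ollama", "modelo local", "cpu"].any
      (fun k => PySem.Str.isIn k (PySem.Str.lower prompt))) = c5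
  generalize (["buscar", "pesquisar", "google"].any
      (fun k => PySem.Str.isIn k (PySem.Str.lower prompt))) = c6
  cases c1 <;> cases c2 <;> cases c3 <;> cases c4 <;> cases c5 <;> cases c6 <;> rfl

-- ===== VERDICT (by name: the statement is the Claim_ definition above) =====
theorem analyze_prompt_for_mcps_spec : Claim_equal_analyze_prompt_for_mcps := by
  intro prompt _
  exact (analyze_prompt_for_mcps_eq prompt).symm ▸ rfl
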